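-- pv_equiv track=rewrite | github.com/repository-rapidos/drinbd_n_repeat_seas | all_in_one.py | start_by_first_extrema
-- ===== SOURCE A (Python) =====
-- def start_by_first_extrema(series):
-- 	"""
-- 	for example we have a series like: [4,3,5, 1,5,4,9,6,7, 1,5,4,9,6,7, 1,5,4,9,6,7,]
-- 		its max = 9 and min = 1, those are extremum
-- 		the first extrema is the mininum, so 1 because it apears firstly on index 3
-- 		and the last (second) extrema is the maximum, so 9, because it apears firstly
-- 		on index 6.
-- 		So here we will slice the series from index min(3, 6) => 3
--
-- 		So synthetically:
-- 		The series : [4, 3, 5, 1, 5, 4, 9, 6, 7, 1, 5, 4, 9, 6, 7, 1, 5, 4, 9, 6, 7]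
-- 		Becomes :			  [1, 5, 4, 9, 6, 7, 1, 5, 4, 9, 6, 7, 1, 5, 4, 9, 6, 7]
--
--
-- 		Other example:
-- 		The series : [4, 3, 5, 9, 3, 5, 1, 5, 9, 3, 5, 1, 5, 9, 3, 5, 1, 5, 9, 3, 5, 1, 5]
-- 		Becomes :			  [9, 3, 5, 1, 5, 9, 3, 5, 1, 5, 9, 3, 5, 1, 5, 9, 3, 5, 1, 5]
--
-- 	"""
--
-- 	series = list(series)
-- 	min_ = min(series)
-- 	max_ = max(series)
-- 	### get index of first min value:
-- 	for idx, item in enumerate(series):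
-- 		if item == min_:
-- 			idx_min = idx
-- 			break
-- 	### get index of first max value:
-- 	for idx, item in enumerate(series):
-- 		if item == max_:
-- 			idx_max = idx
-- 			break
-- 	start_by = min(idx_min, idx_max)
-- 	series = series[start_by:]
-- 	return series
-- ===== SOURCE B (Python) =====
-- def start_by_first_extrema(series):
--     series = list(series)
--     if not series:
--         raise ValueError("min() arg is an empty sequence")
--     mn = series[-1]
--     mx = series[-1]
--     keep = 1
--     seen = 1
--     for v in reversed(series[:-1]):
--         seen += 1
--         if v <= mn or v >= mx:
--             if v < mn:
--                 mn = v
--             if v > mx: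
--                 mx = v
--             keep = seen
--     return series[len(series) - keep:]
-- ===== Notes on version B (the rewrite author's own statement) =====
-- stated objective: alternative
-- what changed: B replaces A's staged forward scans (builtin min(), builtin max(), then two separate first-index searches and an index comparison) with a single right-to-left record-keeping pass that maintains the running min/max of the suffix seen so far and the length of the answer suffix, then slices once; Pre_ excludes only the empty list, on which both raise ValueError.
import Mathlib
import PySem

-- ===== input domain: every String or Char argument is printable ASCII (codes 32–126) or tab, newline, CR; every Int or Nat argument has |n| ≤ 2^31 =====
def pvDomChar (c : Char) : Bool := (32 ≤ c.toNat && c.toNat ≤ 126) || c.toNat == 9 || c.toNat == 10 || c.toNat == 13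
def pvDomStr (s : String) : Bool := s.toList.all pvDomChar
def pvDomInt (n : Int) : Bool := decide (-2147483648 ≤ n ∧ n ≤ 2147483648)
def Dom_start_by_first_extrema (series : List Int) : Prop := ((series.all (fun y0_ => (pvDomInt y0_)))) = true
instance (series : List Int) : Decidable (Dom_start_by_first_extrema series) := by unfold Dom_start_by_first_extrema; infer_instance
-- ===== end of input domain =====

-- B replaces A's staged forward scans (min(), max(), two first-index searches) by one
-- right-to-left pass keeping the running suffix min/max and the answer-suffix length
-- (objective: alternative, same O(n)).


-- ===== PORT A =====
-- A's 'for idx, item in enumerate(series): if item == t: idx_min = idx; break'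
def pvFindFirstEq (t : Int) : List Int → Int → Option Int
  | [], _ => none
  | y :: ys, idx => if y = t then some idx else pvFindFirstEq t ys (idx + 1)

def start_by_first_extrema (series : List Int) : List Int :=
  match PySem.List.min? series (fun y => y), PySem.List.max? series (fun y => y) with
  | some mn, some mx =>
    match pvFindFirstEq mn series 0, pvFindFirstEq mx series 0 with
    | some imn, some imx => PySem.List.slice series (some (min imn imx)) none
    | _, _ => []   -- unreachable: mn/mx are members, so Python's break always fires
  | _, _ => []     -- Python raises ValueError on the empty list; excluded by Pre_

-- ===== PORT B =====
-- B's loop body over reversed(series[:-1]); state (mn, mx, keep, seen)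
def pvStepB (st : Int × Int × Int × Int) (v : Int) : Int × Int × Int × Int :=
  let mn := st.1
  let mx := st.2.1
  let keep := st.2.2.1
  let seen := st.2.2.2 + 1
  if v ≤ mn ∨ mx ≤ v then
    (if v < mn then v else mn, if mx < v then v else mx, seen, seen)
  else (mn, mx, keep, seen)

def start_by_first_extrema_alt (series : List Int) : List Int :=
  match series with
  | [] => []   -- Python B raises ValueError here; excluded by Pre_
  | x :: xs =>
    -- series[-1] on the nonempty list (Python never raises here)
    let lastv := (x :: xs).getLast (by simp)
    let st := ((PySem.List.slice (x :: xs) none (some (-1))).reverse).foldl pvStepB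
                (lastv, lastv, 1, 1)
    PySem.List.slice (x :: xs) (some ((((x :: xs).length : Int)) - st.2.2.1)) none

-- ===== PRECONDITION & SPEC =====
-- Pre_ excludes exactly the empty list, on which A (min of empty sequence) raises ValueError.
def Pre_start_by_first_extrema (series : List Int) : Prop := series ≠ []
instance (series : List Int) : Decidable (Pre_start_by_first_extrema series) := by unfold Pre_start_by_first_extrema; infer_instance
def pvWitness_start_by_first_extrema : List Int := [4, 3, 5, 1, 5, 9]

def Spec_start_by_first_extrema (series : List Int) (out : List Int) : Prop := out = start_by_first_extrema_alt series
instance (series : List Int) (out : List Int) : Decidable (Spec_start_by_first_extrema series out) := by unfold Spec_start_by_first_extrema; infer_instance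

-- ===== CLAIM (what is proved, stated in full; the proofs are below) =====
def Claim_equal_start_by_first_extrema : Prop := ∀ (series : List Int), Dom_start_by_first_extrema series → Pre_start_by_first_extrema series → Spec_start_by_first_extrema series (start_by_first_extrema series)

-- ===== LEMMAS AND PROOFS =====

-- Right-to-left recursion computing B's loop state (mn, mx, keep) structurally.
def pvG : List Int → Int × Int × Int
  | [] => (0, 0, 0)
  | [v] => (v, v, 1)
  | v :: w :: rest =>
    let p := pvG (w :: rest)
    if v ≤ p.1 ∨ p.2.1 ≤ v then
      ((if v < p.1 then v else p.1), (if p.2.1 < v then v else p.2.1),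
       (((w :: rest).length : Int) + 1))
    else p

-- B's foldl over reversed(series[:-1]) equals the structural right-to-left recursion pvG.
theorem pvFoldl_eq_pvG : ∀ (s : List Int) (h : s ≠ []),
    (s.dropLast.reverse).foldl pvStepB (s.getLast h, s.getLast h, 1, 1)
      = ((pvG s).1, (pvG s).2.1, (pvG s).2.2, (s.length : Int)) := by
  intro s
  induction s with
  | nil => intro h; exact absurd rfl h
  | cons v rest ih =>
    intro _
    match rest with
    | [] => simp [pvG]
    | w :: rs =>
      have hne : w :: rs ≠ [] := by simp
      have hdl : (v :: w :: rs).dropLast = v :: (w :: rs).dropLast := by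
        simp [List.dropLast]
      have hgl : (v :: w :: rs).getLast (by simp) = (w :: rs).getLast hne :=
        List.getLast_cons hne
      rw [hdl, hgl, List.reverse_cons, List.foldl_append, ih hne]
      simp only [List.foldl_cons, List.foldl_nil, pvStepB, pvG]
      split
      · push_cast; simp
      · simp

-- pvG on a nonempty list yields the minimum, the maximum, and a keep-length k with
-- length - k = min(first index of the minimum, first index of the maximum).
theorem pvG_spec : ∀ (s : List Int), s ≠ [] →
    (pvG s).1 ∈ s ∧ (∀ y ∈ s, (pvG s).1 ≤ y) ∧
    (pvG s).2.1 ∈ s ∧ (∀ y ∈ s, y ≤ (pvG s).2.1) ∧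
    1 ≤ (pvG s).2.2 ∧ (pvG s).2.2 ≤ (s.length : Int) ∧
    (s.length : Int) - (pvG s).2.2
      = min ((s.findIdx (fun y => y = (pvG s).1) : Int))
            ((s.findIdx (fun y => y = (pvG s).2.1) : Int)) := by
  intro s
  induction s with
  | nil => intro h; exact absurd rfl h
  | cons v rest ih =>
    intro _
    match rest with
    | [] =>
      refine ⟨by simp [pvG], ?_, by simp [pvG], ?_, by simp [pvG], by simp [pvG], ?_⟩
      · intro y hy; simp at hy; simp [pvG, hy]
      · intro y hy; simp at hy; simp [pvG, hy]
      · have h1 : pvG [v] = (v, v, 1) := rfl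
        simp [h1, List.findIdx_cons]
    | w :: rs =>
      obtain ⟨hm1, hm2, hx1, hx2, hk1, hk2, hk3⟩ := ih (by simp)
      set p := pvG (w :: rs) with hp
      by_cases hc : v ≤ p.1 ∨ p.2.1 ≤ v
      · -- v is a new extremum record: answer restarts at the head
        have hG : pvG (v :: w :: rs)
            = ((if v < p.1 then v else p.1), (if p.2.1 < v then v else p.2.1),
               (((w :: rs).length : Int) + 1)) := by
          rw [pvG]; simp only [← hp, if_pos hc]
        rw [hG]
        dsimp only
        have hmle : (if v < p.1 then v else p.1) ≤ v := by split <;> omega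
        have hmle' : (if v < p.1 then v else p.1) ≤ p.1 := by split <;> omega
        have hxge : v ≤ (if p.2.1 < v then v else p.2.1) := by split <;> omega
        have hxge' : p.2.1 ≤ (if p.2.1 < v then v else p.2.1) := by split <;> omega
        refine ⟨?_, ?_, ?_, ?_, by omega, by simp, ?_⟩
        · by_cases h : v < p.1
          · simp [h]
          · rw [if_neg h]; exact List.mem_cons_of_mem _ hm1
        · intro y hy
          rcases List.mem_cons.mp hy with rfl | hy
          · exact hmle
          · exact le_trans hmle' (hm2 y hy)
        · by_cases h : p.2.1 < v
          · simp [h]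
          · rw [if_neg h]; exact List.mem_cons_of_mem _ hx1
        · intro y hy
          rcases List.mem_cons.mp hy with rfl | hy
          · exact hxge
          · exact le_trans (hx2 y hy) hxge'
        · -- the head equals the new min or the new max, so one findIdx is 0
          have hlen : (((v :: w :: rs).length : Int)) = ((w :: rs).length : Int) + 1 := by
            simp
          have hhead : v = (if v < p.1 then v else p.1) ∨ v = (if p.2.1 < v then v else p.2.1) := by
            rcases hc with h | h
            · left; split <;> omega
            · right; split <;> omega
          rcases hhead with h | h
          · have e1 : List.findIdx (fun y => decide (y = (if v < p.1 then v else p.1)))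
                (v :: w :: rs) = 0 := by
              rw [List.findIdx_cons]
              have : (decide (v = (if v < p.1 then v else p.1))) = true := by simp [← h]
              rw [this]
              rfl
            rw [e1]
            have : (0:Int) ≤ (((v :: w :: rs).findIdx
                (fun y => decide (y = (if p.2.1 < v then v else p.2.1))) : Int)) := by positivity
            omega
          · have e2 : List.findIdx (fun y => decide (y = (if p.2.1 < v then v else p.2.1)))
                (v :: w :: rs) = 0 := by
              rw [List.findIdx_cons]
              have : (decide (v = (if p.2.1 < v then v else p.2.1))) = true := by simp [← h]
              rw [this]
              rfl
            rw [e2]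
            have : (0:Int) ≤ (((v :: w :: rs).findIdx
                (fun y => decide (y = (if v < p.1 then v else p.1))) : Int)) := by positivity
            omega
      · -- p.1 < v < p.2.1 : nothing changes
        have hlt : p.1 < v := by omega
        have hgt : v < p.2.1 := by omega
        have hG : pvG (v :: w :: rs) = p := by
          rw [pvG]; simp only [← hp]
          rw [if_neg hc]
        rw [hG]
        have hlen : (((v :: w :: rs).length : Int)) = ((w :: rs).length : Int) + 1 := by
          simp
        refine ⟨List.mem_cons_of_mem _ hm1, ?_, List.mem_cons_of_mem _ hx1, ?_,
                hk1, by omega, ?_⟩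
        · intro y hy
          rcases List.mem_cons.mp hy with rfl | hy
          · omega
          · exact hm2 y hy
        · intro y hy
          rcases List.mem_cons.mp hy with rfl | hy
          · omega
          · exact hx2 y hy
        · have hv1 : (decide (v = p.1)) = false := by simp; omega
          have hv2 : (decide (v = p.2.1)) = false := by simp; omega
          have e1 : List.findIdx (fun y => decide (y = p.1)) (v :: w :: rs)
              = List.findIdx (fun y => decide (y = p.1)) (w :: rs) + 1 := by
            rw [List.findIdx_cons, hv1]
            rfl
          have e2 : List.findIdx (fun y => decide (y = p.2.1)) (v :: w :: rs)
              = List.findIdx (fun y => decide (y = p.2.1)) (w :: rs) + 1 := by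
            rw [List.findIdx_cons, hv2]
            rfl
          rw [e1, e2]
          push_cast
          omega

-- A's first-index loop, for a member, returns idx plus List.findIdx.
theorem pvFindFirstEq_eq (t : Int) (l : List Int) : ∀ i : Int, t ∈ l →
    pvFindFirstEq t l i = some (i + (l.findIdx (fun y => y = t) : Int)) := by
  induction l with
  | nil => intro i h; simp at h
  | cons y ys ih =>
    intro i h
    by_cases hy : y = t
    · simp [pvFindFirstEq, hy, List.findIdx_cons]
    · have ht : t ∈ ys := by
        rcases List.mem_cons.mp h with h' | h'
        · exact absurd h'.symm hy
        · exact h'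
      have := ih (i + 1) ht
      simp [pvFindFirstEq, hy, List.findIdx_cons, this]
      omega

-- ===== VERDICT (by name: the statement is the Claim_ definition above) =====
theorem start_by_first_extrema_spec : Claim_equal_start_by_first_extrema := by
  intro series _ hpre
  unfold Spec_start_by_first_extrema
  obtain ⟨x, xs, rfl⟩ := List.exists_cons_of_ne_nil hpre
  -- A's extrema via min()/max()
  have hmin : PySem.List.min? (x :: xs) (fun y => y) = some (xs.foldl min x) :=
    PySem.List.min?_id_cons x xs
  have hmax : PySem.List.max? (x :: xs) (fun y => y) = some (xs.foldl max x) :=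
    PySem.List.max?_id_cons x xs
  set mnA := xs.foldl min x with hmnA
  set mxA := xs.foldl max x with hmxA
  have hmemA : mnA ∈ x :: xs := PySem.List.min?_mem hmin
  have hmemX : mxA ∈ x :: xs := PySem.List.max?_mem hmax
  -- B's extrema via the right-to-left pass coincide with A's
  obtain ⟨hGm, hGm2, hGx, hGx2, hk1, hk2, hk3⟩ := pvG_spec (x :: xs) (by simp)
  have heqm : (pvG (x :: xs)).1 = mnA :=
    le_antisymm (hGm2 mnA hmemA) (PySem.List.min?_isMin hmin _ hGm)
  have heqx : (pvG (x :: xs)).2.1 = mxA :=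
    le_antisymm (PySem.List.max?_isMax hmax _ hGx) (hGx2 mxA hmemX)
  rw [heqm] at hk3
  rw [heqx] at hk3
  set a := (x :: xs).findIdx (fun y => y = mnA) with ha
  set b := (x :: xs).findIdx (fun y => y = mxA) with hb
  -- A's value: drop at min of the two first indices
  have hAB : start_by_first_extrema (x :: xs) = (x :: xs).drop (min a b) := by
    unfold start_by_first_extrema
    rw [hmin, hmax]
    simp only
    rw [pvFindFirstEq_eq mnA (x :: xs) 0 hmemA, pvFindFirstEq_eq mxA (x :: xs) 0 hmemX]
    simp only [zero_add]
    have : min (a : Int) (b : Int) = ((min a b : Nat) : Int) := by push_cast; rfl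
    rw [this, PySem.List.slice_from_natCast]
  rw [hAB]
  -- B's value: drop at length - keep
  unfold start_by_first_extrema_alt
  simp only
  rw [PySem.List.slice_to_neg_one, pvFoldl_eq_pvG (x :: xs) (by simp)]
  simp only
  have h0 : (0:Int) ≤ (((x :: xs).length : Int)) - (pvG (x :: xs)).2.2 := by omega
  rw [PySem.List.slice_from _ h0]
  congr 1
  omega
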